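-- pv_equiv track=rewrite | github.com/DavidDubovik/devops-lessons | Python_Core for_DevOps/Iterators_and_Generators/main.py | time_range
-- ===== SOURCE A (Python) =====
-- def time_range(time_start: tuple, time_end: tuple) -> tuple:
--     def time_to_seconds(t: tuple[int, int, int]) -> int:
--         hours, minutes, seconds = t
--         return hours * 3600 + minutes * 60 + seconds
--
--     def seconds_to_time(s: int) -> tuple[int, int, int]:
--         hours = (s // 3600) % 24
--         minutes = (s % 3600) // 60
--
--         seconds = s % 60
--         return hours, minutes, seconds
--
--     start_seconds = time_to_seconds(time_start)
--     end_seconds = time_to_seconds(time_end)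
--
--     if end_seconds < start_seconds:
--         end_seconds += 24 * 3600
--     current_seconds = start_seconds
--     while current_seconds <= end_seconds:
--         yield seconds_to_time(current_seconds)
--         current_seconds += 1
-- ===== SOURCE B (Python) =====
-- def time_range(time_start, time_end):
--     hs, ms, ss = time_start
--     start = hs * 3600 + ms * 60 + ss
--     he, me, se = time_end
--     end = he * 3600 + me * 60 + se
--     if end < start:
--         end += 24 * 3600
--     n = end - start + 1
--     h = (start // 3600) % 24
--     m = (start % 3600) // 60
--     s = start % 60
--     for _ in range(n):
--         yield (h, m, s)
--         s += 1
--         if s == 60: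
--             s = 0
--             m += 1
--             if m == 60:
--                 m = 0
--                 h = (h + 1) % 24
-- ===== Notes on version B (the rewrite author's own statement) =====
-- stated objective: alternative
-- what changed: Instead of re-decoding the integer second counter with seconds_to_time (two floor-divisions and three mods) on every iteration, B seeds a running (h, m, s) clock tuple once from the start second and advances it per tick with carry arithmetic (s+=1, carry into m, then h mod 24).
import Mathlib
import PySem

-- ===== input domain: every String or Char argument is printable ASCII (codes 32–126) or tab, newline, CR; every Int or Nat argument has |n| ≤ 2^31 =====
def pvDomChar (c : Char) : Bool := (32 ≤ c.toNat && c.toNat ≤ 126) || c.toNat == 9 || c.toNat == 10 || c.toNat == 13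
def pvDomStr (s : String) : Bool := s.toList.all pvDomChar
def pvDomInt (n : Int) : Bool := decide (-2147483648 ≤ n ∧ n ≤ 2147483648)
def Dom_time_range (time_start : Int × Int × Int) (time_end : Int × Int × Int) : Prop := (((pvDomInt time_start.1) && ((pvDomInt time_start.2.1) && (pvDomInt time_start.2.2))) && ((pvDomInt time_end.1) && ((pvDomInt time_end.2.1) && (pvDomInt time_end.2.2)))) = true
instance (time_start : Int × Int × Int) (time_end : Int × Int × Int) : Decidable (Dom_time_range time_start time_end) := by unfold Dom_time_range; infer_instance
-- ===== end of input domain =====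

-- B replaces A's per-step seconds_to_time decode (two divisions and three mods each tick)
-- by a running (h, m, s) clock tuple advanced with carry arithmetic; objective: alternative decomposition.

-- ===== PORT A =====
def pvTimeToSeconds (t : Int × Int × Int) : Int :=
  t.1 * 3600 + t.2.1 * 60 + t.2.2

def pvSecondsToTime (s : Int) : Int × Int × Int :=
  (PySem.Int.mod (PySem.Int.floordiv s 3600) 24,
   PySem.Int.floordiv (PySem.Int.mod s 3600) 60,
   PySem.Int.mod s 60)

-- the 'while current_seconds <= end_seconds' loop, fuel = number of remaining iterations
def pvLoopA : Nat → Int → List (Int × Int × Int)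
  | 0, _ => []
  | n + 1, cur => pvSecondsToTime cur :: pvLoopA n (cur + 1)

def time_range (time_start : Int × Int × Int) (time_end : Int × Int × Int) : List (Int × Int × Int) :=
  let start_seconds := pvTimeToSeconds time_start
  let end_seconds0 := pvTimeToSeconds time_end
  let end_seconds := if end_seconds0 < start_seconds then end_seconds0 + 24 * 3600 else end_seconds0
  pvLoopA (end_seconds + 1 - start_seconds).toNat start_seconds

-- ===== PORT B =====
-- carry-increment of the running clock tuple
def pvTick : Int × Int × Int → Int × Int × Int
  | (h, m, s) =>
    if s + 1 == 60 then
      if m + 1 == 60 then (PySem.Int.mod (h + 1) 24, 0, 0)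
      else (h, m + 1, 0)
    else (h, m, s + 1)

def pvLoopB : Nat → Int × Int × Int → List (Int × Int × Int)
  | 0, _ => []
  | n + 1, t => t :: pvLoopB n (pvTick t)

def time_range_alt (time_start : Int × Int × Int) (time_end : Int × Int × Int) : List (Int × Int × Int) :=
  let start := time_start.1 * 3600 + time_start.2.1 * 60 + time_start.2.2
  let end0 := time_end.1 * 3600 + time_end.2.1 * 60 + time_end.2.2
  let endv := if end0 < start then end0 + 24 * 3600 else end0
  let n := endv - start + 1
  pvLoopB n.toNat
    (PySem.Int.mod (PySem.Int.floordiv start 3600) 24,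
     PySem.Int.floordiv (PySem.Int.mod start 3600) 60,
     PySem.Int.mod start 60)

-- ===== PRECONDITION & SPEC =====
def Spec_time_range (time_start : Int × Int × Int) (time_end : Int × Int × Int) (out : List (Int × Int × Int)) : Prop := out = time_range_alt time_start time_end
instance (time_start : Int × Int × Int) (time_end : Int × Int × Int) (out : List (Int × Int × Int)) : Decidable (Spec_time_range time_start time_end out) := by unfold Spec_time_range; infer_instance

-- ===== CLAIM (what is proved, stated in full; the proofs are below) =====
def Claim_equal_time_range : Prop := ∀ (time_start : Int × Int × Int) (time_end : Int × Int × Int), Dom_time_range time_start time_end → Spec_time_range time_start time_end (time_range time_start time_end)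

-- ===== LEMMAS AND PROOFS =====

theorem pvTick_decode (s : Int) : pvTick (pvSecondsToTime s) = pvSecondsToTime (s + 1) := by
  simp only [pvSecondsToTime, pvTick,
    PySem.Int.floordiv_eq_ediv_of_pos (a := s) (by norm_num : (0:Int) < 3600),
    PySem.Int.floordiv_eq_ediv_of_pos (a := s + 1) (by norm_num : (0:Int) < 3600),
    PySem.Int.mod_eq_emod_of_pos (by norm_num : (0:Int) < 3600),
    PySem.Int.mod_eq_emod_of_pos (by norm_num : (0:Int) < 60),
    PySem.Int.mod_eq_emod_of_pos (by norm_num : (0:Int) < 24),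
    PySem.Int.floordiv_eq_ediv_of_pos (by norm_num : (0:Int) < 60)]
  split_ifs with h1 h2 <;> simp_all <;> refine ⟨?_, ?_, ?_⟩ <;> omega

theorem pvLoopA_eq_loopB (n : Nat) (cur : Int) :
    pvLoopA n cur = pvLoopB n (pvSecondsToTime cur) := by
  induction n generalizing cur with
  | zero => rfl
  | succ k ih => simp [pvLoopA, pvLoopB, pvTick_decode, ih]

-- ===== VERDICT (by name: the statement is the Claim_ definition above) =====
theorem time_range_spec : Claim_equal_time_range := by
  intro ts te _
  show time_range ts te = time_range_alt ts te
  unfold time_range time_range_alt pvTimeToSeconds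
  rw [pvLoopA_eq_loopB]
  have : ∀ e s : Int, (e + 1 - s).toNat = (e - s + 1).toNat := by intro e s; omega
  simp [pvSecondsToTime, this]
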